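-- pv_equiv track=rewrite | github.com/ruoliu2/instalily-case | instalily-case-backend/ingestion/parser.py | _extract_model_section
-- ===== SOURCE A (Python) =====
-- def _extract_model_section(md: str, model_number: str) -> str:
--     key = f"Parts for the {model_number}"
--     start = md.find(key)
--     if start == -1:
--         return md
--     end_candidates = [
--         md.find("Questions And Answers", start),
--         md.find("Common Symptoms", start),
--         md.find("Videos related", start),
--         md.find("Installation Instructions", start),
--     ]
--     ends = [e for e in end_candidates if e != -1]
--     end = min(ends) if ends else min(len(md), start + 20000)
--     return md[start:end]
-- ===== SOURCE B (Python) =====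
-- def _extract_model_section(md: str, model_number: str) -> str:
--     key = f"Parts for the {model_number}"
--     start = md.find(key)
--     if start == -1:
--         return md
--     markers = ("Questions And Answers", "Common Symptoms",
--                "Videos related", "Installation Instructions")
--     end = next((i for i in range(start, len(md)) if md.startswith(markers, i)),
--                min(len(md), start + 20000))
--     return md[start:end]
-- ===== Notes on version B (the rewrite author's own statement) =====
-- stated objective: alternative
-- what changed: A runs four separate find scans from start and takes the min of the hits; B does one left-to-right scan from start that stops at the first position where any of the four boundary markers starts (A's four-scans-plus-min becomes a single first-hit scan).
import Mathlib
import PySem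

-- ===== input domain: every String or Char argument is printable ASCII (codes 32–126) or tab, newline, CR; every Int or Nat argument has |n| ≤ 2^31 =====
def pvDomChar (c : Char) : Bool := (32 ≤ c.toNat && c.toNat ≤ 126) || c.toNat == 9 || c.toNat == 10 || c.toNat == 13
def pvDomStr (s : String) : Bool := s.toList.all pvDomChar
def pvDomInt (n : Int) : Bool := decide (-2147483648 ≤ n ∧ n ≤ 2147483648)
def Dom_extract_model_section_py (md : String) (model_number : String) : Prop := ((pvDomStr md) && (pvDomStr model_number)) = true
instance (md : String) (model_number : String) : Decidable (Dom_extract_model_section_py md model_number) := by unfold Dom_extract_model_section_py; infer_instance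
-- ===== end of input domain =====

-- B replaces A's four separate find scans plus min by one left-to-right scan that stops at the
-- first position where any boundary marker starts (objective: alternative decomposition, not faster).

-- ===== PORT A =====
def extract_model_section_py (md : String) (model_number : String) : String :=
  let key := "Parts for the " ++ model_number
  let start := PySem.Str.find md key
  if start == -1 then md
  else
    let end_candidates : List Int :=
      [ PySem.Str.findFrom md "Questions And Answers" start,
        PySem.Str.findFrom md "Common Symptoms" start,
        PySem.Str.findFrom md "Videos related" start,
        PySem.Str.findFrom md "Installation Instructions" start ]
    let ends := end_candidates.filter (fun e => e != -1)
    let endI : Int :=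
      match PySem.List.min? ends (fun x => x) with
      | some v => v
      | none => min (PySem.Str.len md) (start + 20000)
    PySem.Str.slice md (some start) (some endI)

-- ===== PORT B =====
def pvMarkers : List String :=
  ["Questions And Answers", "Common Symptoms", "Videos related", "Installation Instructions"]

-- 'md.startswith(markers, i)' at position i
def pvHit (cs : List Char) (i : Nat) : Bool :=
  pvMarkers.any (fun m => PySem.Chars.startswith (cs.drop i) m.toList)

-- the generator scan: first i in [i, i+fuel) with a marker hit
def pvScan (cs : List Char) (i : Nat) : Nat → Option Nat
  | 0 => none
  | fuel + 1 => if pvHit cs i then some i else pvScan cs (i + 1) fuel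

def extract_model_section_py_alt (md : String) (model_number : String) : String :=
  let key := "Parts for the " ++ model_number
  let start := PySem.Str.find md key
  if start == -1 then md
  else
    let s := start.toNat
    let endI : Int :=
      match pvScan md.toList s (md.toList.length - s) with
      | some j => (j : Int)
      | none => min (PySem.Str.len md) (start + 20000)
    PySem.Str.slice md (some start) (some endI)

-- ===== PRECONDITION & SPEC =====
def Spec_extract_model_section_py (md : String) (model_number : String) (out : String) : Prop := out = extract_model_section_py_alt md model_number
instance (md : String) (model_number : String) (out : String) : Decidable (Spec_extract_model_section_py md model_number out) := by unfold Spec_extract_model_section_py; infer_instance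

-- ===== CLAIM (what is proved, stated in full; the proofs are below) =====
def Claim_equal_extract_model_section_py : Prop := ∀ (md : String) (model_number : String), Dom_extract_model_section_py md model_number → Spec_extract_model_section_py md model_number (extract_model_section_py md model_number)

-- ===== LEMMAS AND PROOFS =====

theorem pvScan_eq_find? (cs : List Char) (n : Nat) : ∀ i,
    pvScan cs i n = (List.range' i n).find? (fun j => pvHit cs j) := by
  induction n with
  | zero => intro i; rfl
  | succ n ih =>
    intro i
    rw [List.range'_succ]
    by_cases h : pvHit cs i
    · simp [pvScan, h, List.find?]
    · simp only [Bool.not_eq_true] at h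
      simp [pvScan, h, List.find?, ih]

theorem pvMarkers_ne_nil : ∀ m ∈ pvMarkers, m.toList ≠ [] := by decide

theorem pvHit_nonempty {cs : List Char} {i : Nat} (h : pvHit cs i = true) : i < cs.length := by
  unfold pvHit at h
  simp only [List.any_eq_true] at h
  obtain ⟨m, hm, hp⟩ := h
  rw [PySem.Chars.startswith_iff] at hp
  by_contra hlen
  rw [List.drop_eq_nil_of_le (by omega)] at hp
  exact pvMarkers_ne_nil m hm (List.prefix_nil.mp hp)

theorem pvHit_iff (cs : List Char) (i : Nat) :
    pvHit cs i = true ↔ ∃ m ∈ pvMarkers, m.toList <+: cs.drop i := by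
  unfold pvHit
  simp [List.any_eq_true, PySem.Chars.startswith_iff]

-- a prefix at position j ≥ k is an infix of the suffix at k
theorem pvInfix_of_prefix_drop {m cs : List Char} {k j : Nat} (hk : k ≤ j)
    (h : m <+: cs.drop j) : m <:+: cs.drop k := by
  have : cs.drop j = (cs.drop k).drop (j - k) := by
    rw [List.drop_drop]; congr 1; omega
  rw [this] at h
  exact h.isInfix.trans (List.drop_suffix _ _).isInfix

-- core: A's min of the filtered findFrom results IS B's first-hit scan
theorem pv_min?_eq (cs : List Char) (s : Nat) (hsle : s ≤ cs.length) :
    PySem.List.min?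
        ((pvMarkers.map (fun m => PySem.Chars.findFrom cs m.toList (s : Int) none)).filter
          (fun e => e != -1)) (fun x => x)
      = (pvScan cs s (cs.length - s)).map (fun j => (j : Int)) := by
  rw [pvScan_eq_find?]
  cases hfind : (List.range' s (cs.length - s)).find? (fun j => pvHit cs j) with
  | none =>
    have hnone : ∀ j, s ≤ j → j < cs.length → pvHit cs j = false := by
      intro j h1 h2
      have := List.find?_eq_none.mp hfind j (by
        rw [List.mem_range']; exact ⟨j - s, by omega, by omega⟩)
      simpa using this
    have hall : ∀ m ∈ pvMarkers, PySem.Chars.findFrom cs m.toList (s : Int) none = -1 := by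
      intro m hm
      by_contra hne'
      obtain ⟨h1, h2, _⟩ := PySem.Chars.findFrom_natCast_spec cs m.toList s hsle hne'
      set r := PySem.Chars.findFrom cs m.toList (s : Int) none with hr
      have hhit : pvHit cs r.toNat = true := by
        rw [pvHit_iff]; exact ⟨m, hm, h2⟩
      have hlt := pvHit_nonempty hhit
      have := hnone r.toNat (by omega) hlt
      simp_all
    have hfilter : (pvMarkers.map (fun m => PySem.Chars.findFrom cs m.toList (s : Int) none)).filter (fun e => e != -1) = [] := by
      rw [List.filter_eq_nil_iff]
      intro e he
      obtain ⟨m, hm, rfl⟩ := List.mem_map.mp he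
      simp [hall m hm]
    rw [hfilter]
    simp [PySem.List.min?_eq_none_iff]
  | some j =>
    have hspec := List.find?_eq_some_iff_getElem.mp hfind
    have hhitj : pvHit cs j = true := hspec.1
    obtain ⟨k, hklt, hkget, hkmin⟩ := hspec.2
    have hjk : j = s + k := by
      have := hkget
      rw [List.getElem_range'] at this
      omega
    have hjs : s ≤ j := by omega
    have hjlt : j < cs.length := pvHit_nonempty hhitj
    have hmin : ∀ l, s ≤ l → l < j → pvHit cs l = false := by
      intro l h1 h2
      have := hkmin (l - s) (by omega)
      rw [List.getElem_range'] at this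
      have hls : s + 1 * (l - s) = l := by omega
      rw [hls] at this
      simpa using this
    obtain ⟨mt, hmt, hmtp⟩ := (pvHit_iff cs j).mp hhitj
    have hrt_ne : PySem.Chars.findFrom cs mt.toList (s : Int) none ≠ -1 := by
      intro heq
      rw [PySem.Chars.findFrom_natCast_eq_neg_one_iff cs mt.toList s hsle] at heq
      exact heq (pvInfix_of_prefix_drop hjs hmtp)
    have hcand_ge : ∀ m ∈ pvMarkers, PySem.Chars.findFrom cs m.toList (s : Int) none ≠ -1 →
        (j : Int) ≤ PySem.Chars.findFrom cs m.toList (s : Int) none := by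
      intro m hm hne'
      obtain ⟨h1, h2, _⟩ := PySem.Chars.findFrom_natCast_spec cs m.toList s hsle hne'
      set r := PySem.Chars.findFrom cs m.toList (s : Int) none with hr
      have hhit : pvHit cs r.toNat = true := by
        rw [pvHit_iff]; exact ⟨m, hm, h2⟩
      by_contra hlt
      rw [not_le] at hlt
      have hrj : r.toNat < j := by omega
      have := hmin r.toNat (by omega) hrj
      simp_all
    have hrt_eq : PySem.Chars.findFrom cs mt.toList (s : Int) none = (j : Int) := by
      obtain ⟨h1, h2, h3⟩ := PySem.Chars.findFrom_natCast_spec cs mt.toList s hsle hrt_ne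
      set r := PySem.Chars.findFrom cs mt.toList (s : Int) none with hr
      have hge' := hcand_ge mt hmt hrt_ne
      have hle' : r ≤ (j : Int) := by
        by_contra hgt
        rw [not_le] at hgt
        exact h3 j hjs (by omega) hmtp
      omega
    set ends := (pvMarkers.map (fun m => PySem.Chars.findFrom cs m.toList (s : Int) none)).filter (fun e => e != -1) with hends
    have hjmem' : (j : Int) ∈ ends := by
      rw [hends, List.mem_filter]
      exact ⟨List.mem_map.mpr ⟨mt, hmt, hrt_eq⟩, by simp⟩
    have hallge : ∀ e ∈ ends, (j : Int) ≤ e := by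
      intro e he
      rw [hends, List.mem_filter] at he
      obtain ⟨hm', hne'⟩ := he
      obtain ⟨m, hm, rfl⟩ := List.mem_map.mp hm'
      exact hcand_ge m hm (by simpa using hne')
    cases hmn : PySem.List.min? ends (fun x => x) with
    | none =>
      rw [PySem.List.min?_eq_none_iff] at hmn
      rw [hmn] at hjmem'
      simp at hjmem'
    | some v =>
      have hv1 : v ∈ ends := PySem.List.min?_mem hmn
      have hv2 := PySem.List.min?_isMin hmn _ hjmem'
      have hv3 := hallge v hv1
      have hvj : v = (j : Int) := by omega
      simp [hvj]

-- ===== VERDICT (by name: the statement is the Claim_ definition above) =====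
theorem extract_model_section_py_spec : Claim_equal_extract_model_section_py := by
  intro md model_number _
  unfold Spec_extract_model_section_py extract_model_section_py extract_model_section_py_alt
  dsimp only
  by_cases h0 : PySem.Str.find md ("Parts for the " ++ model_number) == -1
  · rw [if_pos h0, if_pos h0]
  · rw [if_neg h0, if_neg h0]
    have hne : PySem.Str.find md ("Parts for the " ++ model_number) ≠ -1 := by
      simpa using h0
    have hfind_eq : PySem.Str.find md ("Parts for the " ++ model_number)
        = PySem.Chars.find md.toList ("Parts for the " ++ model_number).toList := by
      simp [PySem.Str.find_eq]
    have hge : 0 ≤ PySem.Str.find md ("Parts for the " ++ model_number) := by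
      have := PySem.Chars.neg_one_le_find md.toList ("Parts for the " ++ model_number).toList
      rw [hfind_eq]
      rw [hfind_eq] at hne
      omega
    have hle : PySem.Str.find md ("Parts for the " ++ model_number) ≤ md.toList.length := by
      have := PySem.Chars.find_le_length md.toList ("Parts for the " ++ model_number).toList
      rw [hfind_eq]
      omega
    set start := PySem.Str.find md ("Parts for the " ++ model_number) with hst
    have hcast : start = ((start.toNat : Nat) : Int) := by omega
    rw [hcast]
    have hcands : [ PySem.Str.findFrom md "Questions And Answers" ((start.toNat : Nat) : Int),
        PySem.Str.findFrom md "Common Symptoms" ((start.toNat : Nat) : Int),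
        PySem.Str.findFrom md "Videos related" ((start.toNat : Nat) : Int),
        PySem.Str.findFrom md "Installation Instructions" ((start.toNat : Nat) : Int) ]
        = pvMarkers.map (fun m => PySem.Chars.findFrom md.toList m.toList ((start.toNat : Nat) : Int) none) := by
      simp only [pvMarkers, List.map, PySem.Str.findFrom_eq]
    rw [hcands]
    rw [Int.toNat_natCast]
    rw [pv_min?_eq md.toList start.toNat (by omega)]
    cases pvScan md.toList start.toNat (md.toList.length - start.toNat) <;> rfl
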